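-- pv_equiv track=rewrite | github.com/openakita/openakita | src/openakita/core/policy_v2/engine.py | _strip_glob_anchor
-- ===== SOURCE A (Python) =====
-- def _strip_glob_anchor(p: str) -> str:
--     """剥掉路径末尾的 ``/**``（或 ``/*``）glob 锚定符，返回纯目录前缀。
--
--     举例：
--     - ``c:/windows/**`` → ``c:/windows``
--     - ``/etc/**/`` → ``/etc``（先剥 trailing slash，再剥 ``/**``）
--     - ``/etc/ssh`` → ``/etc/ssh``（无变化）
--     - ``**`` → ``""``（无意义模式）
--     """
--     if not p:
--         return ""
--     s = p.rstrip("/")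
--     while s.endswith("/**") or s.endswith("/*"):
--         s = s[:-3] if s.endswith("/**") else s[:-2]
--     if s in {"**", "*"}:
--         return ""
--     return s
-- ===== SOURCE B (Python) =====
-- def _strip_glob_anchor(p: str) -> str:
--     if not p:
--         return ""
--     segs = p.rstrip("/").split("/")
--     while segs and segs[-1] in ("*", "**"):
--         segs.pop()
--     return "/".join(segs)
-- ===== Notes on version B (the rewrite author's own statement) =====
-- stated objective: simpler
-- what changed: Replaces the repeated suffix-test-and-slice loop plus the lone-glob special case with split on the separator, a pop loop removing trailing glob segments, and a rejoin; the lone-glob case falls out of the join.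
import Mathlib
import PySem

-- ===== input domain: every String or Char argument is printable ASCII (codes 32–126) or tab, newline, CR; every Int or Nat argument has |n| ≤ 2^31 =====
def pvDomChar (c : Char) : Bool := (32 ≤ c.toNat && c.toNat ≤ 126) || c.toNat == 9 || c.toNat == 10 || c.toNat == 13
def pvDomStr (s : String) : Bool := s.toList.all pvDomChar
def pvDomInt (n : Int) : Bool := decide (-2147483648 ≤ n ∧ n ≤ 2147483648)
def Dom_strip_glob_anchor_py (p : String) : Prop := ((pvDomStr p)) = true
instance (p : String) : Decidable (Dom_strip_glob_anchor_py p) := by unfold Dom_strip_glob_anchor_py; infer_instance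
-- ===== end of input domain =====

-- B replaces A's repeated suffix-test-and-slice loop (and its lone-glob special case) by
-- split on '/', a pop loop over trailing glob segments, and a rejoin (objective: simpler).

-- ===== PORT A =====
-- p.rstrip("/") — PySem has no rstrip-with-chars primitive, so this is the exact hand port
-- for the single-character strip set "/": drop the maximal run of '/' from the right end.
def pyRstripSlash (cs : List Char) : List Char :=
  (cs.reverse.dropWhile (· == '/')).reverse

-- while s.endswith("/**") or s.endswith("/*"): s = s[:-3] if s.endswith("/**") else s[:-2]
def stripLoop (s : List Char) : List Char :=
  if PySem.Chars.endswith s ['/', '*', '*'] then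
    stripLoop (PySem.List.slice s none (some (-3)))
  else if PySem.Chars.endswith s ['/', '*'] then
    stripLoop (PySem.List.slice s none (some (-2)))
  else s
termination_by s.length
decreasing_by
  · have h3 : (['/', '*', '*'] : List Char) <:+ s := (PySem.Chars.endswith_iff _ _).mp (by assumption)
    have hlen : 3 ≤ s.length := by simpa using h3.length_le
    rw [PySem.List.slice_to_neg_ofNat s 3 (by omega)]
    simp; omega
  · have h2 : (['/', '*'] : List Char) <:+ s := (PySem.Chars.endswith_iff _ _).mp (by assumption)
    have hlen : 2 ≤ s.length := by simpa using h2.length_le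
    rw [PySem.List.slice_to_neg_ofNat s 2 (by omega)]
    simp; omega

def strip_glob_anchor_py (p : String) : String :=
  if p.toList = [] then ""
  else
    let s := stripLoop (pyRstripSlash p.toList)
    if s = ['*', '*'] ∨ s = ['*'] then "" else String.ofList s

-- ===== PORT B =====
-- while segs and segs[-1] in ("*", "**"): segs.pop()
def popLoop (segs : List (List Char)) : List (List Char) :=
  if segs.getLast? = some ['*'] ∨ segs.getLast? = some ['*', '*'] then
    popLoop segs.dropLast
  else segs
termination_by segs.length
decreasing_by
  have hne : segs ≠ [] := by
    rcases ‹segs.getLast? = some ['*'] ∨ segs.getLast? = some ['*', '*']› with h | h <;>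
      exact fun hn => by simp [hn] at h
  have := List.length_pos_iff.mpr hne
  simp [List.length_dropLast]; omega


def strip_glob_anchor_py_alt (p : String) : String :=
  if p.toList = [] then ""
  else
    String.ofList (PySem.Chars.join ['/']
      (popLoop (PySem.Chars.splitOn (pyRstripSlash p.toList) ['/'])))

-- ===== PRECONDITION & SPEC =====
def Spec_strip_glob_anchor_py (p : String) (out : String) : Prop := out = strip_glob_anchor_py_alt p
instance (p : String) (out : String) : Decidable (Spec_strip_glob_anchor_py p out) := by unfold Spec_strip_glob_anchor_py; infer_instance

-- ===== CLAIM (what is proved, stated in full; the proofs are below) =====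
def Claim_equal_strip_glob_anchor_py : Prop := ∀ (p : String), Dom_strip_glob_anchor_py p → Spec_strip_glob_anchor_py p (strip_glob_anchor_py p)

-- ===== LEMMAS AND PROOFS =====

theorem splitOn_char_cons (c : Char) (rest : List Char) :
    List.splitOn '/' (c :: rest) =
      if c = '/' then [] :: List.splitOn '/' rest
      else List.modifyHead (List.cons c) (List.splitOn '/' rest) := by
  have hdef : ∀ l : List Char, List.splitOn '/' l = List.splitOnP (· == '/') l := fun _ => rfl
  rw [hdef, List.splitOnP_cons, ← hdef]
  simp only [beq_iff_eq]

theorem splitOn_char_ne_nil (l : List Char) : List.splitOn '/' l ≠ [] :=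
  List.splitOnP_ne_nil _ l

theorem go_spec (l : List Char) : ∀ (fuel : Nat) (cur : List Char) (acc : List (List Char)),
    l.length < fuel →
    PySem.Chars.splitOn.go ['/'] fuel l cur acc =
      acc.reverse ++ (cur.reverse ++ (List.splitOn '/' l).headI) :: (List.splitOn '/' l).tail := by
  induction l with
  | nil =>
    intro fuel cur acc hf
    match fuel, hf with
    | fuel + 1, _ =>
      simp [PySem.Chars.splitOn.go, List.splitOn_nil]
  | cons c rest ih =>
    intro fuel cur acc hf
    simp only [List.length_cons] at hf
    obtain ⟨h, t, hs⟩ : ∃ h t, List.splitOn '/' rest = h :: t := by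
      rcases he : List.splitOn '/' rest with _ | ⟨h, t⟩
      · exact absurd he (splitOn_char_ne_nil rest)
      · exact ⟨h, t, rfl⟩
    match fuel, hf with
    | fuel + 1, hf =>
      by_cases hc : c = '/'
      · subst hc
        have hpre : (['/'] : List Char).isPrefixOf ('/' :: rest) = true := by
          simp [List.isPrefixOf]
        simp only [PySem.Chars.splitOn.go, hpre, if_true]
        rw [show List.drop (['/'] : List Char).length ('/' :: rest) = rest from rfl]
        rw [ih fuel [] (cur.reverse :: acc) (by omega)]
        rw [splitOn_char_cons, if_pos rfl]
        simp [hs]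
      · have hpre : (['/'] : List Char).isPrefixOf (c :: rest) = false := by
          simp [List.isPrefixOf, Ne.symm hc]
        simp only [PySem.Chars.splitOn.go, hpre, Bool.false_eq_true, if_false]
        rw [ih fuel (c :: cur) acc (by omega)]
        rw [splitOn_char_cons, if_neg hc]
        simp [hs]

theorem chars_splitOn_single (s : List Char) :
    PySem.Chars.splitOn s ['/'] = List.splitOn '/' s := by
  rw [PySem.Chars.splitOn, go_spec s (s.length + 1) [] [] (by omega)]
  obtain ⟨h, t, hs⟩ : ∃ h t, List.splitOn '/' s = h :: t := by
    rcases he : List.splitOn '/' s with _ | ⟨h, t⟩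
    · exact absurd he (splitOn_char_ne_nil s)
    · exact ⟨h, t, rfl⟩
  simp [hs]

theorem no_sep_of_mem_splitOn (l : List Char) : ∀ (s : List Char),
    s ∈ List.splitOn '/' l → '/' ∉ s := by
  induction l with
  | nil => intro s h; simp [List.splitOn_nil] at h; simp [h]
  | cons c rest ih =>
    intro s h
    rw [splitOn_char_cons] at h
    obtain ⟨hd, t, hs⟩ : ∃ hd t, List.splitOn '/' rest = hd :: t := by
      rcases he : List.splitOn '/' rest with _ | ⟨hd, t⟩
      · exact absurd he (splitOn_char_ne_nil rest)
      · exact ⟨hd, t, rfl⟩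
    by_cases hc : c = '/'
    · rw [if_pos hc] at h
      rcases List.mem_cons.mp h with h | h
      · simp [h]
      · exact ih s h
    · rw [if_neg hc, hs, List.modifyHead] at h
      rcases List.mem_cons.mp h with h | h
      · subst h
        intro hmem
        rcases List.mem_cons.mp hmem with hmem | hmem
        · exact hc hmem.symm
        · exact ih hd (by rw [hs]; exact List.mem_cons_self) hmem
      · exact ih s (by rw [hs]; exact List.mem_cons_of_mem _ h)

-- a list with no '/' has no suffix containing '/'
theorem not_suffix_of_free (a p : List Char) (hfree : '/' ∉ a) (hp : '/' ∈ p) :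
    ¬ (p <:+ a) :=
  fun h => hfree (h.subset hp)

theorem stripLoop_fix (cs : List Char)
    (h3 : ¬ (['/', '*', '*'] <:+ cs)) (h2 : ¬ (['/', '*'] <:+ cs)) :
    stripLoop cs = cs := by
  rw [stripLoop]
  simp [PySem.Chars.endswith_iff, h3, h2]

theorem not_suffix3_of_snd_slash (j : List Char) :
    ¬ (['/', '*', '*'] <:+ j ++ ['/', '*']) := by
  intro h
  rw [← List.reverse_prefix] at h
  simp only [List.reverse_append, List.reverse_cons] at h
  simp [List.cons_prefix_cons] at h

theorem stripLoop_step3 (j : List Char) :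
    stripLoop (j ++ ['/', '*', '*']) = stripLoop j := by
  rw [stripLoop]
  have h : PySem.Chars.endswith (j ++ ['/', '*', '*']) ['/', '*', '*'] = true :=
    (PySem.Chars.endswith_iff _ _).mpr (List.suffix_append j _)
  rw [if_pos h, PySem.List.slice_to_neg_ofNat _ 3 (by omega)]
  congr 1
  rw [List.length_append, List.take_left' (by simp)]

theorem stripLoop_step2 (j : List Char) :
    stripLoop (j ++ ['/', '*']) = stripLoop j := by
  rw [stripLoop]
  rw [if_neg (show ¬ PySem.Chars.endswith (j ++ ['/', '*']) ['/', '*', '*'] = true by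
    rw [PySem.Chars.endswith_iff]; exact not_suffix3_of_snd_slash j)]
  have h2 : PySem.Chars.endswith (j ++ ['/', '*']) ['/', '*'] = true :=
    (PySem.Chars.endswith_iff _ _).mpr (List.suffix_append j _)
  rw [if_pos h2, PySem.List.slice_to_neg_ofNat _ 2 (by omega)]
  congr 1
  rw [List.length_append, List.take_left' (by simp)]

theorem reverse_eq_of_rev (a : List Char) (l : List Char) (ha : a.reverse = l) :
    a = l.reverse := by
  rw [← ha, List.reverse_reverse]

theorem not_suffix_glob (j a : List Char) (hfree : '/' ∉ a)
    (h1 : a ≠ ['*']) (h2 : a ≠ ['*', '*']) :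
    ¬ (['/', '*', '*'] <:+ j ++ '/' :: a) ∧ ¬ (['/', '*'] <:+ j ++ '/' :: a) := by
  have hrev : (j ++ '/' :: a).reverse = a.reverse ++ '/' :: j.reverse := by
    simp
  constructor
  · intro h
    rw [← List.reverse_prefix, hrev] at h
    rcases ha : a.reverse with _ | ⟨x, _ | ⟨y, _ | ⟨z, rest⟩⟩⟩ <;> rw [ha] at h <;>
      simp [List.cons_prefix_cons] at h
    · exact h2 (by rw [reverse_eq_of_rev a _ ha, ← h.1, ← h.2]; rfl)
    · refine hfree ?_
      rw [← List.mem_reverse, ha]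
      simp only [List.mem_cons]
      exact Or.inr (Or.inr (Or.inl h.2.2))
  · intro h
    rw [← List.reverse_prefix, hrev] at h
    rcases ha : a.reverse with _ | ⟨x, _ | ⟨y, rest⟩⟩ <;> rw [ha] at h <;>
      simp [List.cons_prefix_cons] at h
    · exact h1 (by rw [reverse_eq_of_rev a _ ha, ← h]; rfl)
    · refine hfree ?_
      rw [← List.mem_reverse, ha]
      simp only [List.mem_cons]
      exact Or.inr (Or.inl h.2)

theorem join_append_singleton (segs : List (List Char)) (a : List Char) (h : segs ≠ []) :
    PySem.Chars.join ['/'] (segs ++ [a]) = PySem.Chars.join ['/'] segs ++ '/' :: a := by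
  induction segs with
  | nil => exact absurd rfl h
  | cons x rest ih =>
    rcases rest with _ | ⟨y, r⟩
    · simp [PySem.Chars.join_cons_cons, PySem.Chars.join_singleton]
    · have hih := ih (by simp)
      simp only [List.cons_append] at hih ⊢
      rw [PySem.Chars.join_cons_cons, PySem.Chars.join_cons_cons, hih]
      simp

theorem stripLoop_nil : stripLoop [] = [] :=
  stripLoop_fix [] (fun h => by simpa using h.length_le) (fun h => by simpa using h.length_le)

theorem stripLoop_free (a : List Char) (hfa : '/' ∉ a) : stripLoop a = a :=
  stripLoop_fix a (not_suffix_of_free a _ hfa (by simp)) (not_suffix_of_free a _ hfa (by simp))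

theorem main_lemma (segs : List (List Char)) :
    (∀ s ∈ segs, '/' ∉ s) →
    (if stripLoop (PySem.Chars.join ['/'] segs) = ['*', '*'] ∨
        stripLoop (PySem.Chars.join ['/'] segs) = ['*'] then ([] : List Char)
     else stripLoop (PySem.Chars.join ['/'] segs)) =
    PySem.Chars.join ['/'] (popLoop segs) := by
  induction segs using List.reverseRecOn with
  | nil =>
    intro _
    rw [popLoop]
    simp only [List.getLast?_nil, reduceCtorEq, or_self, if_false]
    rw [PySem.Chars.join_nil, stripLoop_nil]
    simp
  | append_singleton init a ih =>
    intro hfree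
    have hfa : '/' ∉ a := hfree a (by simp)
    have hfi : ∀ s ∈ init, '/' ∉ s := fun s hs => hfree s (by simp [hs])
    have hlast : (init ++ [a]).getLast? = some a := by simp
    by_cases hg : a = ['*'] ∨ a = ['*', '*']
    · have hpop : popLoop (init ++ [a]) = popLoop init := by
        rw [popLoop, if_pos (by rw [hlast]; rcases hg with h | h <;> simp [h]),
          List.dropLast_concat]
      rw [hpop, ← ih hfi]
      by_cases hinit : init = []
      · subst hinit
        rw [List.nil_append, PySem.Chars.join_singleton, PySem.Chars.join_nil,
          stripLoop_nil, stripLoop_free a hfa]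
        rw [if_pos (by rcases hg with h | h <;> simp [h]), if_neg (by simp)]
      · rw [join_append_singleton _ _ hinit]
        rcases hg with h | h <;> subst h
        · rw [show ('/' :: ['*'] : List Char) = ['/', '*'] from rfl, stripLoop_step2]
        · rw [show ('/' :: ['*', '*'] : List Char) = ['/', '*', '*'] from rfl, stripLoop_step3]
    · rw [not_or] at hg
      obtain ⟨h1, h2⟩ := hg
      have hpop : popLoop (init ++ [a]) = init ++ [a] := by
        rw [popLoop, if_neg (by rw [hlast]; simp [h1, h2])]
      rw [hpop]
      by_cases hinit : init = []
      · subst hinit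
        rw [List.nil_append, PySem.Chars.join_singleton, stripLoop_free a hfa,
          if_neg (by simp [h1, h2])]
      · rw [join_append_singleton _ _ hinit]
        obtain ⟨hs3, hs2⟩ := not_suffix_glob (PySem.Chars.join ['/'] init) a hfa h1 h2
        rw [stripLoop_fix _ hs3 hs2]
        have hmem : '/' ∈ PySem.Chars.join ['/'] init ++ '/' :: a := by simp
        rw [if_neg (by rintro (hh | hh) <;> rw [hh] at hmem <;> simp at hmem)]

-- ===== VERDICT (by name: the statement is the Claim_ definition above) =====
theorem strip_glob_anchor_py_spec : Claim_equal_strip_glob_anchor_py := by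
  intro p _
  unfold Spec_strip_glob_anchor_py strip_glob_anchor_py strip_glob_anchor_py_alt
  by_cases hp : p.toList = []
  · simp [hp]
  · rw [if_neg hp, if_neg hp]
    dsimp only
    have hb : PySem.Chars.splitOn (pyRstripSlash p.toList) ['/'] =
        List.splitOn '/' (pyRstripSlash p.toList) := chars_splitOn_single _
    have hround : PySem.Chars.join ['/'] (List.splitOn '/' (pyRstripSlash p.toList)) =
        pyRstripSlash p.toList := by
      show (['/'] : List Char).intercalate (List.splitOn '/' (pyRstripSlash p.toList)) =
        pyRstripSlash p.toList
      exact List.intercalate_splitOn _ '/'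
    have hmain := main_lemma (List.splitOn '/' (pyRstripSlash p.toList))
      (fun s hs => no_sep_of_mem_splitOn (pyRstripSlash p.toList) s hs)
    rw [hround] at hmain
    rw [hb, ← hmain]
    split_ifs with hset <;> rfl
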